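-- pv_equiv track=rewrite | github.com/shaniavina/Leetcode_Python | detect_capital.py | detectCapitalUse
-- ===== SOURCE A (Python) =====
-- def detectCapitalUse(word):
--     """
--     :type word: str
--     :rtype: bool
--     """
--     if len(word) <= 1:
--         return True
--
--     if ord(word[0]) < ord('a'):
--         if ord(word[1]) < ord('a'):
--             for i in range(2, len(word)):
--                 if ord(word[i]) >= ord('a'):
--                     return False
--         else:
--             for i in range(2, len(word)):
--                 if ord(word[i]) < ord('a'):
--                     return False
--
--     else:
--         for i in range(1, len(word)):
--             if ord(word[i]) < ord('a'):
--                 return False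
--     return True
-- ===== SOURCE B (Python) =====
-- def detectCapitalUse(word):
--     if len(word) <= 1:
--         return True
--     up = lambda c: c < 'a'
--     return (all(up(c) for c in word)
--             or all(not up(c) for c in word)
--             or (up(word[0]) and all(not up(c) for c in word[1:])))
-- ===== Notes on version B (the rewrite author's own statement) =====
-- stated objective: simpler
-- what changed: Replaces A's dispatch on the first two characters with nested scan loops by a flat disjunction of three whole-word passes (all-upper, all-lower, capitalized), keeping the same codepoint-threshold uppercase test.
import Mathlib
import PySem

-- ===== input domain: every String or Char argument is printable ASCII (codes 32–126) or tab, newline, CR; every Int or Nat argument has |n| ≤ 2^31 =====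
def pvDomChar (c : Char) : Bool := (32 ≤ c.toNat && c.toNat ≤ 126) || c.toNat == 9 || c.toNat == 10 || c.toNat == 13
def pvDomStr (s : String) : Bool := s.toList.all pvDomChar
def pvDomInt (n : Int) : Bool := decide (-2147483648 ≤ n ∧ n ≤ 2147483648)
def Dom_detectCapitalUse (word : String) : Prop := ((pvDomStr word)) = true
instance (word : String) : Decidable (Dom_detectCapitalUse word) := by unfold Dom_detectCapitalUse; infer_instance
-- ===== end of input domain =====

-- B replaces A's dispatch on the first two characters (with a dedicated scan loop per case)
-- by a flat disjunction of three whole-word passes; objective: simpler.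

-- ===== PORT A =====
-- 'for i in range(k, len): if ord(word[i]) >= ord('a'): return False' — scan demanding every char upper
def pvScanAllUpper : List Char → Bool
  | [] => true
  | c :: rest => if 'a' ≤ c then false else pvScanAllUpper rest

-- the analogous scan demanding every char lower
def pvScanAllLower : List Char → Bool
  | [] => true
  | c :: rest => if c < 'a' then false else pvScanAllLower rest

def detectCapitalUse (word : String) : Bool :=
  match word.toList with
  | [] => true
  | [_] => true
  | c0 :: c1 :: rest =>
    if c0 < 'a' then
      if c1 < 'a' then pvScanAllUpper rest
      else pvScanAllLower rest
    else pvScanAllLower (c1 :: rest)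

-- ===== PORT B =====
def pvIsUp (c : Char) : Bool := c < 'a'

def detectCapitalUse_alt (word : String) : Bool :=
  let cs := word.toList
  if cs.length ≤ 1 then true
  else
    cs.all pvIsUp
    || cs.all (fun c => !pvIsUp c)
    || (pvIsUp (cs.headD 'a') && (cs.drop 1).all (fun c => !pvIsUp c))

-- ===== PRECONDITION & SPEC =====
def Spec_detectCapitalUse (word : String) (out : Bool) : Prop := out = detectCapitalUse_alt word
instance (word : String) (out : Bool) : Decidable (Spec_detectCapitalUse word out) := by unfold Spec_detectCapitalUse; infer_instance

-- ===== CLAIM (what is proved, stated in full; the proofs are below) =====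
def Claim_equal_detectCapitalUse : Prop := ∀ (word : String), Dom_detectCapitalUse word → Spec_detectCapitalUse word (detectCapitalUse word)

-- ===== LEMMAS AND PROOFS =====
theorem pvScanAllUpper_eq_all (l : List Char) : pvScanAllUpper l = l.all pvIsUp := by
  induction l with
  | nil => rfl
  | cons c rest ih =>
    by_cases h : 'a' ≤ c
    · simp [pvScanAllUpper, pvIsUp, h, not_lt.mpr h]
    · simp [pvScanAllUpper, pvIsUp, h, lt_of_not_ge h, ih]

theorem pvScanAllLower_eq_all (l : List Char) : pvScanAllLower l = l.all (fun c => !pvIsUp c) := by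
  induction l with
  | nil => rfl
  | cons c rest ih =>
    by_cases h : c < 'a'
    · simp [pvScanAllLower, pvIsUp, h]
    · simp [pvScanAllLower, pvIsUp, h, ih]

-- ===== VERDICT (by name: the statement is the Claim_ definition above) =====
theorem detectCapitalUse_spec : Claim_equal_detectCapitalUse := by
  intro word _
  unfold Spec_detectCapitalUse detectCapitalUse detectCapitalUse_alt
  match h : word.toList with
  | [] => simp
  | [_] => simp
  | c0 :: c1 :: rest =>
    simp only [List.length_cons, List.headD_cons, List.drop_succ_cons, List.drop_zero]
    simp only [pvScanAllUpper_eq_all, pvScanAllLower_eq_all]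
    by_cases h0 : c0 < 'a' <;> by_cases h1 : c1 < 'a' <;>
      simp [h0, h1, pvIsUp, List.all_cons]
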